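-- pv_equiv track=rewrite | github.com/edt-yxz-zzd/python3_src | nn_ns/fileformat/ogg/read_generic_ogg_file.py | iter_split_segment_table
-- ===== SOURCE A (Python) =====
-- def iter_split_segment_table(segment_table):
--     begin = 0
--     for i, u8 in enumerate(segment_table):
--         if u8 < 0xFF:
--             end = i+1
--             yield segment_table[begin:end]
--             begin = end
--     if begin != len(segment_table):
--         yield segment_table[begin:]
-- ===== SOURCE B (Python) =====
-- def iter_split_segment_table(segment_table):
--     chunk = []
--     for u8 in segment_table:
--         chunk.append(u8)
--         if u8 < 0xFF:
--             yield chunk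
--             chunk = []
--     if chunk:
--         yield chunk
-- ===== Notes on version B (the rewrite author's own statement) =====
-- stated objective: simpler
-- what changed: A tracks indices and slices the original list between cut positions; B keeps no indices at all: it accumulates elements into a current chunk, emits the chunk whenever a byte < 0xFF is seen, and emits the nonempty remainder at the end.
import Mathlib
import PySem

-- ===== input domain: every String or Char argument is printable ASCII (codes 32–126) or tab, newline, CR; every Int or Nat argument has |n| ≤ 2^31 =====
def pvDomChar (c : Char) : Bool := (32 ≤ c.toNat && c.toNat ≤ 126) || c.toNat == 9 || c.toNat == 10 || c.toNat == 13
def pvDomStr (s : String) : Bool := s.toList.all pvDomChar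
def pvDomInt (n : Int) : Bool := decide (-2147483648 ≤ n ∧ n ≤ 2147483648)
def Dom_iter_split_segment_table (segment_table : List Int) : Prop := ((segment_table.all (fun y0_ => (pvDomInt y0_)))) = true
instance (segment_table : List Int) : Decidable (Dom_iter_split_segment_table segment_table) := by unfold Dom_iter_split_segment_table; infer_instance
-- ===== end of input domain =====

-- B drops A's index bookkeeping and slicing: it accumulates elements into a chunk,
-- emitting it at each byte < 0xFF and the nonempty remainder at the end (objective: simpler).
-- ===== PORT A =====
-- the 'for i, u8 in enumerate(...)' loop with running index i and state 'begin';
-- the base case is the trailing 'if begin != len(segment_table): yield segment_table[begin:]'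
def iter_split_go (st rest : List Int) (i begin_ : Nat) : List (List Int) :=
  match rest with
  | [] =>
      if (begin_ : Int) ≠ (st.length : Int) then [PySem.List.slice st (some (begin_ : Int)) none] else []
  | u8 :: r =>
      if u8 < 255 then
        PySem.List.slice st (some (begin_ : Int)) (some ((i : Int) + 1)) :: iter_split_go st r (i + 1) (i + 1)
      else
        iter_split_go st r (i + 1) begin_

def iter_split_segment_table (segment_table : List Int) : List (List Int) :=
  iter_split_go segment_table segment_table 0 0

-- ===== PORT B =====
-- the 'for u8 in segment_table' loop with accumulator 'chunk';
-- the base case is the trailing 'if chunk: yield chunk'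
def alt_go (rest chunk : List Int) : List (List Int) :=
  match rest with
  | [] => if chunk ≠ [] then [chunk] else []
  | u8 :: r =>
      let c := chunk ++ [u8]
      if u8 < 255 then c :: alt_go r [] else alt_go r c

def iter_split_segment_table_alt (segment_table : List Int) : List (List Int) :=
  alt_go segment_table []

-- ===== PRECONDITION & SPEC =====
def Spec_iter_split_segment_table (segment_table : List Int) (out : List (List Int)) : Prop := out = iter_split_segment_table_alt segment_table
instance (segment_table : List Int) (out : List (List Int)) : Decidable (Spec_iter_split_segment_table segment_table out) := by unfold Spec_iter_split_segment_table; infer_instance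

-- ===== CLAIM =====
def Claim_equal_iter_split_segment_table : Prop := ∀ (segment_table : List Int), Dom_iter_split_segment_table segment_table → Spec_iter_split_segment_table segment_table (iter_split_segment_table segment_table)

-- ===== LEMMAS AND PROOFS =====

-- loop invariant: begin ≤ |st|, the elements from 'begin' onward are chunk ++ rest,
-- and i = begin + |chunk|; then A's remaining loop equals B's remaining loop.
theorem go_eq (st : List Int) :
    ∀ (rest chunk : List Int) (b : Nat),
      b ≤ st.length →
      st.drop b = chunk ++ rest →
      iter_split_go st rest (b + chunk.length) b = alt_go rest chunk := by
  intro rest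
  induction rest with
  | nil =>
      intro chunk b hb hdrop
      have hlen : st.length - b = chunk.length := by
        have := congrArg List.length hdrop
        simpa using this
      simp only [iter_split_go, alt_go, PySem.List.slice_from_natCast, hdrop]
      by_cases hc : chunk = []
      · subst hc
        have : b = st.length := by simp at hlen; omega
        simp [this]
      · have : b ≠ st.length := by
          intro h; apply hc
          have : chunk.length = 0 := by omega
          exact List.eq_nil_of_length_eq_zero this
        simp [hc, this]
  | cons u8 r ih =>
      intro chunk b hb hdrop
      have hlen : st.length - b = chunk.length + 1 + r.length := by
        have := congrArg List.length hdrop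
        simp at this; omega
      have hslice : PySem.List.slice st (some (b : Int)) (some (((b + chunk.length : Nat) : Int) + 1))
          = chunk ++ [u8] := by
        have he : ((b + chunk.length : Nat) : Int) + 1 = ((b + (chunk.length + 1) : Nat) : Int) := by
          push_cast; ring
        rw [he, PySem.List.slice_natCast, hdrop]
        have he2 : b + (chunk.length + 1) - b = chunk.length + 1 := by omega
        rw [he2]
        have hsplit : chunk ++ u8 :: r = (chunk ++ [u8]) ++ r := by simp
        rw [hsplit, show chunk.length + 1 = (chunk ++ [u8]).length by simp,
            List.take_left]
      have hdrop' : st.drop (b + chunk.length + 1) = r := by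
        have he : st.drop (b + chunk.length + 1) = (st.drop b).drop (chunk.length + 1) := by
          rw [List.drop_drop]; ring_nf
        rw [he, hdrop, show chunk ++ u8 :: r = (chunk ++ [u8]) ++ r by simp,
            show chunk.length + 1 = (chunk ++ [u8]).length by simp, List.drop_left]
      by_cases h : u8 < 255
      · simp only [iter_split_go, alt_go, h, if_pos]
        rw [hslice]
        have := ih [] (b + chunk.length + 1) (by omega) (by simpa using hdrop')
        simp only [List.length_nil, Nat.add_zero] at this
        rw [this]
      · simp only [iter_split_go, alt_go, h, ite_false]
        have := ih (chunk ++ [u8]) b hb (by simp [hdrop])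
        simp only [List.length_append, List.length_cons, List.length_nil] at this
        convert this using 2

-- ===== VERDICT =====
theorem iter_split_segment_table_spec : Claim_equal_iter_split_segment_table := by
  intro st _
  unfold Spec_iter_split_segment_table iter_split_segment_table iter_split_segment_table_alt
  simpa using go_eq st st [] 0 (by omega) (by simp)
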